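-- pv_equiv track=rewrite | github.com/EdvardPedersen/AssignmentBalancer | approved.py | get_assignment_status
-- ===== SOURCE A (Python) =====
-- from collections import defaultdict
--
-- def get_assignment_status(row):
--     assignment_names = defaultdict(list)
--     assignment_scores = defaultdict(int)
--     for key in row:
--         for num in ['1', '2', '3']:
--             if "oppgavesett " + num in key.lower() and "points" not in key.lower() and "score" not in key.lower():
--                 assignment_names[num].append(key)
--     for num in assignment_names:
--         for name in assignment_names[num]:
--             number = row[name].split(',')[0]
--             if number == "":
--                 continue
--             assignment_scores[num] += int(number)
--     return assignment_scores
-- ===== SOURCE B (Python) =====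
-- def get_assignment_status(row):
--     # one pass over row keeping running (total, seen_nonempty) per set number,
--     # instead of building an intermediate name index and summing in a second pass
--     sums = {}
--     for key in row:
--         low = key.lower()
--         if "points" in low or "score" in low:
--             continue
--         for num in ('1', '2', '3'):
--             if "oppgavesett " + num in low:
--                 if num not in sums:
--                     sums[num] = (0, False)
--                 first = row[key].split(',')[0]
--                 if first != "":
--                     total, _ = sums[num]
--                     sums[num] = (total + int(first), True)
--     return {num: total for num, (total, seen) in sums.items() if seen}
-- ===== Notes on version B (the rewrite author's own statement) =====
-- stated objective: simpler
-- what changed: B collapses A's two-pass design (build a defaultdict(list) index of matching column names per set number, then iterate the index and sum) into one pass over the row that keeps a running (total, seen_nonempty) pair per set number and emits the totals at the end.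
-- outside the precondition, e.g. on get_assignment_status({'Oppgavesett 1': 'abc'}): A raises ValueError, B raises ValueError
import Mathlib
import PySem

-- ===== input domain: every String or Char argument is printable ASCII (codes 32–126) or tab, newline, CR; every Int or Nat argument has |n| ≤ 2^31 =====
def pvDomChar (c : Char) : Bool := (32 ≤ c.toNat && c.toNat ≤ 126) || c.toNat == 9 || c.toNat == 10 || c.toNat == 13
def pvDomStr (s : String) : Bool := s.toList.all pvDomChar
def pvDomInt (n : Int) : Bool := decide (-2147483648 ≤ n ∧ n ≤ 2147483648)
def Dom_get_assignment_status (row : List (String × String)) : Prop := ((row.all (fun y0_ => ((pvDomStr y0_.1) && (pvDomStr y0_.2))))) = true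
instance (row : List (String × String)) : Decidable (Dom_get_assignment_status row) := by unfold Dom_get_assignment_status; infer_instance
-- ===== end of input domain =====

-- B replaces A's build-an-index-of-column-names-then-sum two-pass by a single pass over the
-- row keeping a running (total, seen_nonempty) pair per assignment-set number (simpler).

-- shared helpers (each port uses them the way its Python uses the corresponding expressions)
def gasNums : List String := ["1", "2", "3"]

-- row[name].split(',')[0]  (split with a non-empty separator never yields [])
def gasFirst (s : String) : String := ((PySem.Str.split? s ",").getD []).headD ""

-- "oppgavesett " + num in key.lower() and "points" not in key.lower() and "score" not in key.lower()
def gasMatch (key num : String) : Bool :=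
  PySem.Str.isIn ("oppgavesett " ++ num) (PySem.Str.lower key)
    && !(PySem.Str.isIn "points" (PySem.Str.lower key))
    && !(PySem.Str.isIn "score" (PySem.Str.lower key))

-- ===== PORT A =====
def get_assignment_status (row : List (String × String)) : List (String × Int) :=
  let names : PySem.Dict String (List String) :=
    row.foldl (fun d kv =>
      gasNums.foldl (fun d num =>
        if gasMatch kv.1 num then d.modify num [] (fun l => l ++ [kv.1]) else d) d)
      PySem.Dict.empty
  let scores : PySem.Dict String Int :=
    names.keys.foldl (fun d num =>
      (names.getD num []).foldl (fun d name =>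
        let number := gasFirst ((row.lookup name).getD "")
        if number == "" then d
        else d.modify num 0 (fun t => t + (PySem.Int.ofStr? number).getD 0)) d)
      PySem.Dict.empty
  scores.items

-- ===== PORT B =====
def get_assignment_status_alt (row : List (String × String)) : List (String × Int) :=
  let sums : PySem.Dict String (Int × Bool) :=
    row.foldl (fun d kv =>
      let low := PySem.Str.lower kv.1
      if PySem.Str.isIn "points" low || PySem.Str.isIn "score" low then d
      else
        gasNums.foldl (fun d num =>
          if PySem.Str.isIn ("oppgavesett " ++ num) low then
            let d := if d.contains num then d else d.insert num (0, false)
            let first := gasFirst ((row.lookup kv.1).getD "")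
            if !(first == "") then
              d.insert num ((d.getD num (0, false)).1 + (PySem.Int.ofStr? first).getD 0, true)
            else d
          else d) d)
      PySem.Dict.empty
  (sums.items.filter (fun p => p.2.2)).map (fun p => (p.1, p.2.1))

-- ===== PRECONDITION & SPEC =====
-- Pre_ excludes exactly the rows where Python's int() raises ValueError: a matched
-- "oppgavesett n" column whose value's part before the first comma is non-empty yet not a
-- valid Python integer literal.
def Pre_get_assignment_status (row : List (String × String)) : Prop :=
  (row.all (fun kv =>
    !(gasNums.any (fun num => gasMatch kv.1 num))
      || (let s := gasFirst ((row.lookup kv.1).getD "")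
          (s == "") || (PySem.Int.ofStr? s).isSome))) = true
instance (row : List (String × String)) : Decidable (Pre_get_assignment_status row) := by
  unfold Pre_get_assignment_status; infer_instance

def pvWitness_get_assignment_status : (List (String × String)) :=
  [("Oppgavesett 1", "5,ok"), ("Oppgavesett 2 Score", "x"), ("name", "bob")]

def Spec_get_assignment_status (row : List (String × String)) (out : List (String × Int)) : Prop := out = get_assignment_status_alt row
instance (row : List (String × String)) (out : List (String × Int)) : Decidable (Spec_get_assignment_status row out) := by unfold Spec_get_assignment_status; infer_instance

-- ===== CLAIM (what is proved, stated in full; the proofs are below) =====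
def Claim_equal_get_assignment_status : Prop := ∀ (row : List (String × String)), Dom_get_assignment_status row → Pre_get_assignment_status row → Spec_get_assignment_status row (get_assignment_status row)

-- ===== LEMMAS AND PROOFS =====

def gasPairs (row : List (String × String)) : List (String × String) :=
  row.flatMap (fun kv => (gasNums.filter (fun num => gasMatch kv.1 num)).map (fun num => (num, kv.1)))

def gasVal (row : List (String × String)) (key : String) : String :=
  gasFirst ((row.lookup key).getD "")

def pVals (row : List (String × String)) (ps : List (String × String)) (num : String) : List String :=
  (ps.filter (fun p => p.1 == num)).map (fun p => gasVal row p.2)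

def pSum (row : List (String × String)) (ps : List (String × String)) (num : String) : Int :=
  (((pVals row ps num).filter (fun s => !(s == ""))).map (fun s => (PySem.Int.ofStr? s).getD 0)).sum

def pSeen (row : List (String × String)) (ps : List (String × String)) (num : String) : Bool :=
  (pVals row ps num).any (fun s => !(s == ""))

-- common normal form both ports are proved equal to
def gasNF (row : List (String × String)) : List (String × Int) :=
  ((PySem.Set.ofList ((gasPairs row).map (fun p => p.1))).filter
      (fun num => pSeen row (gasPairs row) num)).map
    (fun num => (num, pSum row (gasPairs row) num))

def stepPB (row : List (String × String)) (d : PySem.Dict String (Int × Bool)) (p : String × String) : PySem.Dict String (Int × Bool) :=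
  let d := if d.contains p.1 then d else d.insert p.1 ((0 : Int), false)
  let first := gasVal row p.2
  if !(first == "") then
    d.insert p.1 ((d.getD p.1 ((0 : Int), false)).1 + (PySem.Int.ofStr? first).getD 0, true)
  else d

theorem stepPB_keys (row : List (String × String)) (d : PySem.Dict String (Int × Bool)) (p : String × String) :
    (stepPB row d p).keys = PySem.Set.add d.keys p.1 := by
  unfold stepPB
  by_cases hc : d.contains p.1 = true
  · have hmem : p.1 ∈ d.keys := (PySem.Dict.contains_iff_mem_keys d p.1).mp hc
    simp only [hc, if_true]
    have hadd : PySem.Set.add d.keys p.1 = d.keys := by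
      simp [PySem.Set.add, PySem.Set.contains, hmem]
    rw [hadd]
    split
    · exact PySem.Dict.keys_insert_of_contains d _ hc
    · rfl
  · have hc' : d.contains p.1 = false := by simpa using hc
    have hmem : p.1 ∉ d.keys := fun h => by simp [( PySem.Dict.contains_iff_mem_keys d p.1).mpr h] at hc
    simp only [hc', Bool.false_eq_true, if_false]
    have hadd : PySem.Set.add d.keys p.1 = d.keys ++ [p.1] := by
      simp [PySem.Set.add, PySem.Set.contains, hmem]
    rw [hadd]
    split
    · rw [PySem.Dict.keys_insert_of_contains _ _ (by simp [PySem.Dict.contains_insert_self]),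
        PySem.Dict.keys_insert_of_not_contains _ _ hc']
    · exact PySem.Dict.keys_insert_of_not_contains _ _ hc'

theorem B_keys (row : List (String × String)) :
    ∀ (ps : List (String × String)) (d : PySem.Dict String (Int × Bool)),
      (ps.foldl (stepPB row) d).keys = PySem.Set.update d.keys (ps.map (fun p => p.1))
  | [], d => by simp [PySem.Set.update]
  | p :: ps, d => by
    rw [List.foldl_cons, B_keys row ps (stepPB row d p), stepPB_keys]
    simp [PySem.Set.update]

theorem B_getD (row : List (String × String)) (num : String) :
    ∀ (ps : List (String × String)) (d : PySem.Dict String (Int × Bool)),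
      (ps.foldl (stepPB row) d).getD num ((0 : Int), false) =
        ((d.getD num ((0 : Int), false)).1 + pSum row ps num,
         (d.getD num ((0 : Int), false)).2 || pSeen row ps num)
  | [], d => by simp [pSum, pSeen, pVals]
  | p :: ps, d => by
    rw [List.foldl_cons, B_getD row num ps (stepPB row d p)]
    have hstep : (stepPB row d p).getD num ((0:Int), false) =
        if p.1 = num then
          (if gasVal row p.2 == "" then d.getD num ((0:Int),false)
           else ((d.getD num ((0:Int),false)).1 + (PySem.Int.ofStr? (gasVal row p.2)).getD 0, true))
        else d.getD num ((0:Int), false) := by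
      unfold stepPB
      have hd1 : (if d.contains p.1 then d else d.insert p.1 ((0:Int), false)).getD num ((0:Int), false)
          = d.getD num ((0:Int), false) := by
        by_cases hc : d.contains p.1 = true
        · simp [hc]
        · have hc' : d.contains p.1 = false := by simpa using hc
          rw [if_neg (by simp [hc']), PySem.Dict.getD_insert]
          by_cases hn : num = p.1
          · subst hn; rw [if_pos rfl, PySem.Dict.getD_of_not_contains _ _ hc']
          · rw [if_neg hn]
      by_cases hval : gasVal row p.2 == ""
      · simp only [hval, Bool.not_true, Bool.false_eq_true, if_false, hd1]
        split <;> rfl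
      · have hval' : (gasVal row p.2 == "") = false := by simpa using hval
        simp only [hval', Bool.not_false, if_true, hd1, PySem.Dict.getD_insert]
        by_cases hn : p.1 = num
        · subst hn; simp [hd1]
        · rw [if_neg (fun h => hn h.symm), if_neg hn]
    rw [hstep]
    have hps : pSum row (p :: ps) num =
        (if p.1 = num ∧ ¬ (gasVal row p.2 == "") then (PySem.Int.ofStr? (gasVal row p.2)).getD 0 else 0) + pSum row ps num := by
      by_cases h1 : p.1 = num <;> by_cases h2 : (gasVal row p.2 == "") = true <;>
        simp [pSum, pVals, h1, h2]
    have hsn : pSeen row (p :: ps) num =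
        ((decide (p.1 = num) && !(gasVal row p.2 == "")) || pSeen row ps num) := by
      by_cases h1 : p.1 = num <;> by_cases h2 : (gasVal row p.2 == "") = true <;>
        simp [pSeen, pVals, h1, h2]
    rw [hps, hsn]
    by_cases h1 : p.1 = num <;> by_cases h2 : (gasVal row p.2 == "") = true <;>
      simp [h1, h2] <;> ring_nf

theorem B_step_kv (row : List (String × String)) (d : PySem.Dict String (Int × Bool)) (kv : String × String) :
    (let low := PySem.Str.lower kv.1
     if PySem.Str.isIn "points" low || PySem.Str.isIn "score" low then d
     else
       gasNums.foldl (fun d num =>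
         if PySem.Str.isIn ("oppgavesett " ++ num) low then
           let d := if d.contains num then d else d.insert num ((0 : Int), false)
           let first := gasFirst ((row.lookup kv.1).getD "")
           if !(first == "") then
             d.insert num ((d.getD num ((0 : Int), false)).1 + (PySem.Int.ofStr? first).getD 0, true)
           else d
         else d) d)
    = ((gasNums.filter (fun num => gasMatch kv.1 num)).map (fun num => (num, kv.1))).foldl (stepPB row) d := by
  by_cases hps : (PySem.Str.isIn "points" (PySem.Str.lower kv.1) || PySem.Str.isIn "score" (PySem.Str.lower kv.1)) = true
  · have hnil : gasNums.filter (fun num => gasMatch kv.1 num) = [] := by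
      apply List.filter_eq_nil_iff.mpr
      intro num _
      rcases Bool.or_eq_true_iff.mp hps with h | h <;>
        (simp only [gasMatch, h, Bool.not_true, Bool.and_false, Bool.false_and]; decide)
    simp only [hnil, List.map_nil, List.foldl_nil, hps, if_true]
  · have hps' : (PySem.Str.isIn "points" (PySem.Str.lower kv.1) || PySem.Str.isIn "score" (PySem.Str.lower kv.1)) = false := by
      simpa using hps
    have hp : PySem.Str.isIn "points" (PySem.Str.lower kv.1) = false := by
      rcases Bool.or_eq_false_iff.mp hps' with ⟨h1, h2⟩; exact h1
    have hs : PySem.Str.isIn "score" (PySem.Str.lower kv.1) = false := by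
      rcases Bool.or_eq_false_iff.mp hps' with ⟨h1, h2⟩; exact h2
    have heq : ∀ num, gasMatch kv.1 num = PySem.Str.isIn ("oppgavesett " ++ num) (PySem.Str.lower kv.1) := by
      intro num; simp only [gasMatch, hp, hs, Bool.not_false, Bool.and_true]
    simp only [hps', Bool.false_eq_true, if_false]
    rw [show (gasNums.filter (fun num => gasMatch kv.1 num))
        = gasNums.filter (fun num => PySem.Str.isIn ("oppgavesett " ++ num) (PySem.Str.lower kv.1)) from
      List.filter_congr (fun num _ => heq num)]
    rw [List.foldl_map]
    rw [← PySem.List.foldl_if_eq_foldl_filter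
      (p := fun num => PySem.Str.isIn ("oppgavesett " ++ num) (PySem.Str.lower kv.1))
      (f := fun d num => stepPB row d (num, kv.1))]
    rfl

theorem B_sums (row : List (String × String)) :
    row.foldl (fun d kv =>
      let low := PySem.Str.lower kv.1
      if PySem.Str.isIn "points" low || PySem.Str.isIn "score" low then d
      else
        gasNums.foldl (fun d num =>
          if PySem.Str.isIn ("oppgavesett " ++ num) low then
            let d := if d.contains num then d else d.insert num ((0 : Int), false)
            let first := gasFirst ((row.lookup kv.1).getD "")
            if !(first == "") then
              d.insert num ((d.getD num ((0 : Int), false)).1 + (PySem.Int.ofStr? first).getD 0, true)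
            else d
          else d) d) PySem.Dict.empty
    = (gasPairs row).foldl (stepPB row) PySem.Dict.empty := by
  rw [gasPairs, List.foldl_flatMap]
  apply PySem.List.foldl_congr_mem
  intro acc kv _
  exact B_step_kv row acc kv

theorem Set_update_nil_eq_ofList (xs : List String) :
    PySem.Set.update ([] : List String) xs = PySem.Set.ofList xs := by
  rw [PySem.Set.ofList_eq_foldl]; rfl

theorem B_eq_NF (row : List (String × String)) :
    get_assignment_status_alt row = gasNF row := by
  unfold get_assignment_status_alt
  rw [B_sums row]
  show (((gasPairs row).foldl (stepPB row) PySem.Dict.empty).items.filter (fun p => p.2.2)).map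
      (fun p => (p.1, p.2.1)) = gasNF row
  have hkeys : ((gasPairs row).foldl (stepPB row) PySem.Dict.empty).keys
      = PySem.Set.ofList ((gasPairs row).map (fun p => p.1)) := by
    rw [B_keys, PySem.Dict.keys_empty, Set_update_nil_eq_ofList]
  have hnodup : ((gasPairs row).foldl (stepPB row) PySem.Dict.empty).keys.Nodup := by
    rw [hkeys]; exact PySem.Set.nodup_ofList _
  rw [PySem.Dict.items_eq_map_keys _ hnodup ((0 : Int), false), hkeys]
  rw [List.map_congr_left (fun num _ => by
    simp [B_getD row num (gasPairs row) PySem.Dict.empty, PySem.Dict.getD_empty] : ∀ num ∈ PySem.Set.ofList ((gasPairs row).map (fun p => p.1)),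
      (fun k => (k, ((gasPairs row).foldl (stepPB row) PySem.Dict.empty).getD k ((0:Int), false))) num
        = (fun k => (k, (pSum row (gasPairs row) k, pSeen row (gasPairs row) k))) num)]
  rw [List.filter_map, List.map_map]
  rfl

-- ===== A side =====
def stepN (d : PySem.Dict String (List String)) (p : String × String) : PySem.Dict String (List String) :=
  d.modify p.1 [] (fun l => l ++ [p.2])

theorem A_names_kv (d : PySem.Dict String (List String)) (kv : String × String) :
    gasNums.foldl (fun d num =>
        if gasMatch kv.1 num then d.modify num [] (fun l => l ++ [kv.1]) else d) d
      = ((gasNums.filter (fun num => gasMatch kv.1 num)).map (fun num => (num, kv.1))).foldl stepN d := by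
  rw [List.foldl_map,
    ← PySem.List.foldl_if_eq_foldl_filter (p := fun num => gasMatch kv.1 num)
      (f := fun d num => stepN d (num, kv.1))]
  rfl

theorem A_names (row : List (String × String)) :
    row.foldl (fun d kv =>
        gasNums.foldl (fun d num =>
          if gasMatch kv.1 num then d.modify num [] (fun l => l ++ [kv.1]) else d) d)
      PySem.Dict.empty
    = (gasPairs row).foldl stepN PySem.Dict.empty := by
  rw [gasPairs, List.foldl_flatMap]
  apply PySem.List.foldl_congr_mem
  intro acc kv _
  exact A_names_kv acc kv

theorem A_names_getD (row : List (String × String)) (num : String) :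
    ((gasPairs row).foldl stepN PySem.Dict.empty).getD num []
      = ((gasPairs row).filter (fun p => p.1 == num)).map (fun p => p.2) := by
  have h := PySem.Dict.getD_foldl_modify_append (gasPairs row) (PySem.Dict.empty) num
  rw [PySem.Dict.getD_empty] at h
  simpa [stepN] using h

theorem A_names_keys (row : List (String × String)) :
    ((gasPairs row).foldl stepN PySem.Dict.empty).keys
      = PySem.Set.ofList ((gasPairs row).map (fun p => p.1)) := by
  have h := PySem.Dict.keys_foldl_modify_key (gasPairs row) (fun p => p.1) []
    (fun _ p l => l ++ [p.2]) PySem.Dict.empty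
  rw [PySem.Dict.keys_empty, Set_update_nil_eq_ofList] at h
  exact h

def gasInner (row : List (String × String)) (num : String) (d : PySem.Dict String Int) (name : String) : PySem.Dict String Int :=
  if gasVal row name == "" then d
  else d.modify num 0 (fun t => t + (PySem.Int.ofStr? (gasVal row name)).getD 0)

def vSum (row : List (String × String)) (vs : List String) : Int :=
  (((vs.map (gasVal row)).filter (fun s => !(s == ""))).map (fun s => (PySem.Int.ofStr? s).getD 0)).sum

def vSeen (row : List (String × String)) (vs : List String) : Bool :=
  (vs.map (gasVal row)).any (fun s => !(s == ""))

theorem keys_modify_add (d : PySem.Dict String Int) (k : String) (d0 : Int) (f : Int → Int) :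
    (d.modify k d0 f).keys = PySem.Set.add d.keys k := by
  rw [PySem.Dict.keys_modify]
  by_cases hc : d.contains k = true
  · rw [PySem.Dict.keys_insert_of_contains _ _ hc]
    have : k ∈ d.keys := (PySem.Dict.contains_iff_mem_keys d k).mp hc
    simp [PySem.Set.add, PySem.Set.contains, this]
  · have hc' : d.contains k = false := by simpa using hc
    rw [PySem.Dict.keys_insert_of_not_contains _ _ hc']
    have : k ∉ d.keys := fun h => by simp [(PySem.Dict.contains_iff_mem_keys d k).mpr h] at hc
    simp [PySem.Set.add, PySem.Set.contains, this]

theorem blk_getD (row : List (String × String)) (num : String) :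
    ∀ (vs : List String) (d : PySem.Dict String Int) (x : String),
      (vs.foldl (gasInner row num) d).getD x 0
        = d.getD x 0 + (if x = num then vSum row vs else 0)
  | [], d, x => by simp [vSum]
  | v :: vs, d, x => by
    rw [List.foldl_cons, blk_getD row num vs (gasInner row num d v) x]
    by_cases hv : (gasVal row v == "") = true
    · have : gasInner row num d v = d := by simp [gasInner, hv]
      rw [this]
      have : vSum row (v :: vs) = vSum row vs := by simp [vSum, hv]
      rw [this]
    · have hv' : (gasVal row v == "") = false := by simpa using hv
      have h1 : gasInner row num d v = d.modify num 0 (fun t => t + (PySem.Int.ofStr? (gasVal row v)).getD 0) := by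
        simp [gasInner, hv']
      have h2 : vSum row (v :: vs) = (PySem.Int.ofStr? (gasVal row v)).getD 0 + vSum row vs := by
        simp [vSum, hv']
      rw [h1, h2, PySem.Dict.getD_modify]
      by_cases hx : x = num
      · subst hx; simp; ring
      · simp [hx]

theorem blk_keys (row : List (String × String)) (num : String) :
    ∀ (vs : List String) (d : PySem.Dict String Int),
      (vs.foldl (gasInner row num) d).keys
        = if vSeen row vs then PySem.Set.add d.keys num else d.keys
  | [], d => by simp [vSeen]
  | v :: vs, d => by
    rw [List.foldl_cons, blk_keys row num vs (gasInner row num d v)]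
    by_cases hv : (gasVal row v == "") = true
    · have h1 : gasInner row num d v = d := by simp [gasInner, hv]
      have h2 : vSeen row (v :: vs) = vSeen row vs := by simp [vSeen, hv]
      rw [h1, h2]
    · have hv' : (gasVal row v == "") = false := by simpa using hv
      have h1 : (gasInner row num d v).keys = PySem.Set.add d.keys num := by
        simp only [gasInner, hv', Bool.false_eq_true, if_false]
        exact keys_modify_add _ _ _ _
      have h2 : vSeen row (v :: vs) = true := by simp [vSeen, hv']
      rw [h2]
      cases hseen : vSeen row vs <;> simp [h1]

theorem scores_getD (row : List (String × String)) (F : String → List String) :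
    ∀ (Ns : List String) (d : PySem.Dict String Int) (x : String), Ns.Nodup →
      (Ns.foldl (fun d num => (F num).foldl (gasInner row num) d) d).getD x 0
        = d.getD x 0 + (if x ∈ Ns then vSum row (F x) else 0)
  | [], d, x, _ => by simp
  | num :: Ns, d, x, hnd => by
    rw [List.foldl_cons,
      scores_getD row F Ns ((F num).foldl (gasInner row num) d) x (List.nodup_cons.mp hnd).2,
      blk_getD]
    by_cases hx : x = num
    · subst hx
      have hnot : x ∉ Ns := (List.nodup_cons.mp hnd).1
      simp [hnot]
    · simp [hx, List.mem_cons]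

theorem scores_keys (row : List (String × String)) (F : String → List String) :
    ∀ (Ns : List String) (d : PySem.Dict String Int), Ns.Nodup → (∀ n ∈ Ns, n ∉ d.keys) →
      (Ns.foldl (fun d num => (F num).foldl (gasInner row num) d) d).keys
        = d.keys ++ Ns.filter (fun num => vSeen row (F num))
  | [], d, _, _ => by simp
  | num :: Ns, d, hnd, hfresh => by
    rw [List.foldl_cons]
    have hkb : ((F num).foldl (gasInner row num) d).keys
        = if vSeen row (F num) then PySem.Set.add d.keys num else d.keys := blk_keys row num (F num) d
    have hnum : num ∉ d.keys := hfresh num (List.mem_cons_self)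
    have hadd : PySem.Set.add d.keys num = d.keys ++ [num] := by
      simp [PySem.Set.add, PySem.Set.contains, hnum]
    have hfresh' : ∀ n ∈ Ns, n ∉ ((F num).foldl (gasInner row num) d).keys := by
      intro n hn
      rw [hkb]
      have hne : n ≠ num := fun h => (List.nodup_cons.mp hnd).1 (h ▸ hn)
      have hnd' : n ∉ d.keys := hfresh n (List.mem_cons_of_mem _ hn)
      cases hseen : vSeen row (F num) <;> simp [hadd, hnd', hne]
    rw [scores_keys row F Ns _ (List.nodup_cons.mp hnd).2 hfresh', hkb]
    cases hseen : vSeen row (F num) <;> simp [hseen, hadd]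

theorem vSum_F (row : List (String × String)) (x : String) :
    vSum row (((gasPairs row).filter (fun p => p.1 == x)).map (fun p => p.2))
      = pSum row (gasPairs row) x := by
  simp [vSum, pSum, pVals, List.map_map, Function.comp_def]

theorem vSeen_F (row : List (String × String)) (x : String) :
    vSeen row (((gasPairs row).filter (fun p => p.1 == x)).map (fun p => p.2))
      = pSeen row (gasPairs row) x := by
  simp [vSeen, pSeen, pVals, List.map_map, Function.comp_def]

theorem A_scores_items (row : List (String × String)) (names : PySem.Dict String (List String))
    (h : names = (gasPairs row).foldl stepN PySem.Dict.empty) :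
    (names.keys.foldl (fun d num => (names.getD num []).foldl (gasInner row num) d)
        PySem.Dict.empty).items = gasNF row := by
  subst h
  have hkeysN : ((gasPairs row).foldl stepN PySem.Dict.empty).keys
      = PySem.Set.ofList ((gasPairs row).map (fun p => p.1)) := A_names_keys row
  have hndN : ((gasPairs row).foldl stepN PySem.Dict.empty).keys.Nodup := by
    rw [hkeysN]; exact PySem.Set.nodup_ofList _
  have hfresh : ∀ n ∈ ((gasPairs row).foldl stepN PySem.Dict.empty).keys,
      n ∉ (PySem.Dict.empty : PySem.Dict String Int).keys := by
    intro n _; rw [PySem.Dict.keys_empty]; exact List.not_mem_nil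
  have hk := scores_keys row (fun num => ((gasPairs row).foldl stepN PySem.Dict.empty).getD num [])
    ((gasPairs row).foldl stepN PySem.Dict.empty).keys PySem.Dict.empty hndN hfresh
  beta_reduce at hk
  rw [PySem.Dict.keys_empty, List.nil_append] at hk
  have hndS : (((gasPairs row).foldl stepN PySem.Dict.empty).keys.foldl
      (fun d num => (((gasPairs row).foldl stepN PySem.Dict.empty).getD num []).foldl (gasInner row num) d)
      PySem.Dict.empty).keys.Nodup := by
    rw [hk]; exact List.Nodup.filter _ hndN
  rw [PySem.Dict.items_eq_map_keys _ hndS 0, hk]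
  have hmapc : ∀ x ∈ ((gasPairs row).foldl stepN PySem.Dict.empty).keys.filter
        (fun num => vSeen row (((gasPairs row).foldl stepN PySem.Dict.empty).getD num [])),
      (fun k => (k, (((gasPairs row).foldl stepN PySem.Dict.empty).keys.foldl
          (fun d num => (((gasPairs row).foldl stepN PySem.Dict.empty).getD num []).foldl (gasInner row num) d)
          PySem.Dict.empty).getD k 0)) x
        = (fun k => (k, pSum row (gasPairs row) k)) x := by
    intro x hx
    have hxmem : x ∈ ((gasPairs row).foldl stepN PySem.Dict.empty).keys := (List.mem_filter.mp hx).1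
    have hg := scores_getD row (fun num => ((gasPairs row).foldl stepN PySem.Dict.empty).getD num [])
      ((gasPairs row).foldl stepN PySem.Dict.empty).keys PySem.Dict.empty x hndN
    beta_reduce at hg
    rw [PySem.Dict.getD_empty, if_pos hxmem, zero_add] at hg
    beta_reduce
    rw [hg, A_names_getD, vSum_F]
  rw [List.map_congr_left hmapc]
  have hfc : ((gasPairs row).foldl stepN PySem.Dict.empty).keys.filter
        (fun num => vSeen row (((gasPairs row).foldl stepN PySem.Dict.empty).getD num []))
      = ((gasPairs row).foldl stepN PySem.Dict.empty).keys.filter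
        (fun num => pSeen row (gasPairs row) num) := by
    apply List.filter_congr
    intro x _
    rw [A_names_getD, vSeen_F]
  rw [hfc, hkeysN]
  rfl

theorem A_eq_NF (row : List (String × String)) :
    get_assignment_status row = gasNF row := by
  unfold get_assignment_status
  exact A_scores_items row _ (A_names row)

-- ===== VERDICT (by name: the statement is the Claim_ definition above) =====
theorem get_assignment_status_spec : Claim_equal_get_assignment_status := by
  intro row _ _
  unfold Spec_get_assignment_status
  rw [A_eq_NF, B_eq_NF]
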